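-- pv_equiv track=rewrite | github.com/cobRNA/ConnectOR-optimized | ConnectOR_V2.1.py | assign_simplified_geneType
-- ===== SOURCE A (Python) =====
-- def assign_simplified_geneType(Type):
--     type_dict = {"none": ["none"],
--                  "pc": ["protein_coding", "pc"],
--
--                 "lncRNA": ["lncRNA", "TEC", "processed_transcript", "lincRNA", "3prime_overlapping_ncrna", "antisense",
-- "non_coding", "sense_intronic", "sense_overlapping", "macro_lncRNA","antisense_RNA",
-- "bidirectional_promoter_lncrna", "3prime_overlapping_ncRNA", "bidirectional_promoter_lncRNA"],
--
--                  "ncRNA": ["ncRNA", "snRNA", "snoRNA", "rRNA", "rRNA_pseudogene", "Mt_tRNA", "Mt_rRNA", "misc_RNA", "miRNA", "ribozyme", "sRNA",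
-- "scaRNA", "scRNA", "vault_RNA", "known_ncrna","vaultRNA"],
--
--                  "other": ["other", "processed_pseudogene", "transcribed_processed_pseudogene", "translated_processed_pseudogene", "unprocessed_pseudogene", "transcribed_unprocessed_pseudogene", "translated_unprocessed_pseudogene", "unitary_pseudogene", "transcribed_unitary_pseudogene", "polymorphic pseudogene", "IG_C_gene", "IG_D_gene", "IG_J_gene", "IG_LV_gene", "IG_V_gene", "TR_C_gene", "TR_D_gene", "TR_J_gene", "TR_V_gene", "IG_C_pseudogene", "IG_D_pseudogene", "IG_J_pseudogene", "IG_V_pseudogene", "IG_pseudogene", "TR_J_pseudogene", "TR_V_pseudogene", "NOVEL"]}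
--     biotype = [t for t in type_dict if Type in type_dict[t]]
--     #if biotype == []: biotype = ["ncRNA"]
--     if biotype == []: biotype = ["other"]
--     return(biotype[0])
--
-- def biotype(keys, arguments):
--     biotype=''
--     while not biotype:
--         for k in keys:
--             try:
--                 biotype = arguments[k]
--                 return(biotype)
--             except KeyError:
--                 pass
--         if not biotype: biotype = "NOVEL"
--         return(biotype)
--
-- arguments = []
-- ===== SOURCE B (Python) =====
-- # Flat precomputed biotype -> simplified-category table; single dict lookup, no loop over categories.
-- _SIMPLE_TYPE = {
--     'none': 'none',
--     'protein_coding': 'pc',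
--     'pc': 'pc',
--     'lncRNA': 'lncRNA',
--     'TEC': 'lncRNA',
--     'processed_transcript': 'lncRNA',
--     'lincRNA': 'lncRNA',
--     '3prime_overlapping_ncrna': 'lncRNA',
--     'antisense': 'lncRNA',
--     'non_coding': 'lncRNA',
--     'sense_intronic': 'lncRNA',
--     'sense_overlapping': 'lncRNA',
--     'macro_lncRNA': 'lncRNA',
--     'antisense_RNA': 'lncRNA',
--     'bidirectional_promoter_lncrna': 'lncRNA',
--     '3prime_overlapping_ncRNA': 'lncRNA',
--     'bidirectional_promoter_lncRNA': 'lncRNA',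
--     'ncRNA': 'ncRNA',
--     'snRNA': 'ncRNA',
--     'snoRNA': 'ncRNA',
--     'rRNA': 'ncRNA',
--     'rRNA_pseudogene': 'ncRNA',
--     'Mt_tRNA': 'ncRNA',
--     'Mt_rRNA': 'ncRNA',
--     'misc_RNA': 'ncRNA',
--     'miRNA': 'ncRNA',
--     'ribozyme': 'ncRNA',
--     'sRNA': 'ncRNA',
--     'scaRNA': 'ncRNA',
--     'scRNA': 'ncRNA',
--     'vault_RNA': 'ncRNA',
--     'known_ncrna': 'ncRNA',
--     'vaultRNA': 'ncRNA',
--     'other': 'other',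
--     'processed_pseudogene': 'other',
--     'transcribed_processed_pseudogene': 'other',
--     'translated_processed_pseudogene': 'other',
--     'unprocessed_pseudogene': 'other',
--     'transcribed_unprocessed_pseudogene': 'other',
--     'translated_unprocessed_pseudogene': 'other',
--     'unitary_pseudogene': 'other',
--     'transcribed_unitary_pseudogene': 'other',
--     'polymorphic pseudogene': 'other',
--     'IG_C_gene': 'other',
--     'IG_D_gene': 'other',
--     'IG_J_gene': 'other',
--     'IG_LV_gene': 'other',
--     'IG_V_gene': 'other',
--     'TR_C_gene': 'other',
--     'TR_D_gene': 'other',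
--     'TR_J_gene': 'other',
--     'TR_V_gene': 'other',
--     'IG_C_pseudogene': 'other',
--     'IG_D_pseudogene': 'other',
--     'IG_J_pseudogene': 'other',
--     'IG_V_pseudogene': 'other',
--     'IG_pseudogene': 'other',
--     'TR_J_pseudogene': 'other',
--     'TR_V_pseudogene': 'other',
--     'NOVEL': 'other',
-- }
--
--
-- def assign_simplified_geneType(Type):
--     return _SIMPLE_TYPE.get(Type, "other")
-- ===== Notes on version B (the rewrite author's own statement) =====
-- stated objective: idiomatic
-- what changed: Replaced A's loop over the category dict with list-membership scans (a list comprehension plus empty-check) by a single precomputed flat biotype-to-category dict and one dict.get falling back to the default category for unmatched biotypes.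
import Mathlib
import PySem

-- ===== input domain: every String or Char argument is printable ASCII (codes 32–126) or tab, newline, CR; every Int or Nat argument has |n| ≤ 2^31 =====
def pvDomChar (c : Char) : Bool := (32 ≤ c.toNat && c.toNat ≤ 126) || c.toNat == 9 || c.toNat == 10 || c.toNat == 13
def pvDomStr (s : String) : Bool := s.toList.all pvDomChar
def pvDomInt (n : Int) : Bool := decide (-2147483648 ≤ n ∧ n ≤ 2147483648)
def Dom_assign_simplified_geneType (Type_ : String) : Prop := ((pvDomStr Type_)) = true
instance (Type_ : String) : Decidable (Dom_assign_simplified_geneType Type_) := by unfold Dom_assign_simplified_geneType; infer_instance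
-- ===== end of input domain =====

-- B replaces A's loop over category lists by one precomputed flat biotype→category table and a single dict lookup (idiomatic; same observable behaviour).

-- ===== PORT A =====
-- A's dict literal `type_dict`, as its (key, value) items in insertion order.
def pvTypeDict : List (String × List String) :=
  [("none", ["none"]),
   ("pc", ["protein_coding", "pc"]),
   ("lncRNA", ["lncRNA", "TEC", "processed_transcript", "lincRNA", "3prime_overlapping_ncrna", "antisense", "non_coding", "sense_intronic", "sense_overlapping", "macro_lncRNA", "antisense_RNA", "bidirectional_promoter_lncrna", "3prime_overlapping_ncRNA", "bidirectional_promoter_lncRNA"]),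
   ("ncRNA", ["ncRNA", "snRNA", "snoRNA", "rRNA", "rRNA_pseudogene", "Mt_tRNA", "Mt_rRNA", "misc_RNA", "miRNA", "ribozyme", "sRNA", "scaRNA", "scRNA", "vault_RNA", "known_ncrna", "vaultRNA"]),
   ("other", ["other", "processed_pseudogene", "transcribed_processed_pseudogene", "translated_processed_pseudogene", "unprocessed_pseudogene", "transcribed_unprocessed_pseudogene", "translated_unprocessed_pseudogene", "unitary_pseudogene", "transcribed_unitary_pseudogene", "polymorphic pseudogene", "IG_C_gene", "IG_D_gene", "IG_J_gene", "IG_LV_gene", "IG_V_gene", "TR_C_gene", "TR_D_gene", "TR_J_gene", "TR_V_gene", "IG_C_pseudogene", "IG_D_pseudogene", "IG_J_pseudogene", "IG_V_pseudogene", "IG_pseudogene", "TR_J_pseudogene", "TR_V_pseudogene", "NOVEL"])]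

-- `[t for t in type_dict if Type in type_dict[t]]` iterates the dict's keys and looks each key
-- up in the same literal dict; since the literal's keys are distinct, `type_dict[t]` is exactly
-- the list paired with `t`, so the comprehension is ported as a fold over the items.
def assign_simplified_geneType (Type_ : String) : String :=
  let biotype := pvTypeDict.foldl (fun acc kv => if kv.2.contains Type_ then acc ++ [kv.1] else acc) ([] : List String)
  let biotype := if biotype = [] then ["other"] else biotype
  biotype.headD ""  -- biotype[0]; biotype is never [] here, so Python never raises

-- ===== PORT B =====
-- Source B's module-level `_SIMPLE_TYPE` dict literal.
def pvSimpleType : PySem.Dict String String :=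
  PySem.Dict.ofList
  [("none", "none"),
   ("protein_coding", "pc"),
   ("pc", "pc"),
   ("lncRNA", "lncRNA"),
   ("TEC", "lncRNA"),
   ("processed_transcript", "lncRNA"),
   ("lincRNA", "lncRNA"),
   ("3prime_overlapping_ncrna", "lncRNA"),
   ("antisense", "lncRNA"),
   ("non_coding", "lncRNA"),
   ("sense_intronic", "lncRNA"),
   ("sense_overlapping", "lncRNA"),
   ("macro_lncRNA", "lncRNA"),
   ("antisense_RNA", "lncRNA"),
   ("bidirectional_promoter_lncrna", "lncRNA"),
   ("3prime_overlapping_ncRNA", "lncRNA"),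
   ("bidirectional_promoter_lncRNA", "lncRNA"),
   ("ncRNA", "ncRNA"),
   ("snRNA", "ncRNA"),
   ("snoRNA", "ncRNA"),
   ("rRNA", "ncRNA"),
   ("rRNA_pseudogene", "ncRNA"),
   ("Mt_tRNA", "ncRNA"),
   ("Mt_rRNA", "ncRNA"),
   ("misc_RNA", "ncRNA"),
   ("miRNA", "ncRNA"),
   ("ribozyme", "ncRNA"),
   ("sRNA", "ncRNA"),
   ("scaRNA", "ncRNA"),
   ("scRNA", "ncRNA"),
   ("vault_RNA", "ncRNA"),
   ("known_ncrna", "ncRNA"),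
   ("vaultRNA", "ncRNA"),
   ("other", "other"),
   ("processed_pseudogene", "other"),
   ("transcribed_processed_pseudogene", "other"),
   ("translated_processed_pseudogene", "other"),
   ("unprocessed_pseudogene", "other"),
   ("transcribed_unprocessed_pseudogene", "other"),
   ("translated_unprocessed_pseudogene", "other"),
   ("unitary_pseudogene", "other"),
   ("transcribed_unitary_pseudogene", "other"),
   ("polymorphic pseudogene", "other"),
   ("IG_C_gene", "other"),
   ("IG_D_gene", "other"),
   ("IG_J_gene", "other"),
   ("IG_LV_gene", "other"),
   ("IG_V_gene", "other"),
   ("TR_C_gene", "other"),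
   ("TR_D_gene", "other"),
   ("TR_J_gene", "other"),
   ("TR_V_gene", "other"),
   ("IG_C_pseudogene", "other"),
   ("IG_D_pseudogene", "other"),
   ("IG_J_pseudogene", "other"),
   ("IG_V_pseudogene", "other"),
   ("IG_pseudogene", "other"),
   ("TR_J_pseudogene", "other"),
   ("TR_V_pseudogene", "other"),
   ("NOVEL", "other")]

def assign_simplified_geneType_alt (Type_ : String) : String :=
  pvSimpleType.getD Type_ "other"  -- _SIMPLE_TYPE.get(Type, "other")

-- ===== PRECONDITION & SPEC =====
def Spec_assign_simplified_geneType (Type_ : String) (out : String) : Prop := out = assign_simplified_geneType_alt Type_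
instance (Type_ : String) (out : String) : Decidable (Spec_assign_simplified_geneType Type_ out) := by unfold Spec_assign_simplified_geneType; infer_instance

-- ===== CLAIM (what is proved, stated in full; the proofs are below) =====
def Claim_equal_assign_simplified_geneType : Prop := ∀ (Type_ : String), Dom_assign_simplified_geneType Type_ → Spec_assign_simplified_geneType Type_ (assign_simplified_geneType Type_)

-- ===== LEMMAS AND PROOFS =====
-- The literal dict built by ofList has distinct keys, so its items are exactly the input pairs.
set_option maxRecDepth 100000 in
set_option maxHeartbeats 2000000 in
theorem pvSimpleType_mk : pvSimpleType = PySem.Dict.mk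
  [("none", "none"),
   ("protein_coding", "pc"),
   ("pc", "pc"),
   ("lncRNA", "lncRNA"),
   ("TEC", "lncRNA"),
   ("processed_transcript", "lncRNA"),
   ("lincRNA", "lncRNA"),
   ("3prime_overlapping_ncrna", "lncRNA"),
   ("antisense", "lncRNA"),
   ("non_coding", "lncRNA"),
   ("sense_intronic", "lncRNA"),
   ("sense_overlapping", "lncRNA"),
   ("macro_lncRNA", "lncRNA"),
   ("antisense_RNA", "lncRNA"),
   ("bidirectional_promoter_lncrna", "lncRNA"),
   ("3prime_overlapping_ncRNA", "lncRNA"),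
   ("bidirectional_promoter_lncRNA", "lncRNA"),
   ("ncRNA", "ncRNA"),
   ("snRNA", "ncRNA"),
   ("snoRNA", "ncRNA"),
   ("rRNA", "ncRNA"),
   ("rRNA_pseudogene", "ncRNA"),
   ("Mt_tRNA", "ncRNA"),
   ("Mt_rRNA", "ncRNA"),
   ("misc_RNA", "ncRNA"),
   ("miRNA", "ncRNA"),
   ("ribozyme", "ncRNA"),
   ("sRNA", "ncRNA"),
   ("scaRNA", "ncRNA"),
   ("scRNA", "ncRNA"),
   ("vault_RNA", "ncRNA"),
   ("known_ncrna", "ncRNA"),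
   ("vaultRNA", "ncRNA"),
   ("other", "other"),
   ("processed_pseudogene", "other"),
   ("transcribed_processed_pseudogene", "other"),
   ("translated_processed_pseudogene", "other"),
   ("unprocessed_pseudogene", "other"),
   ("transcribed_unprocessed_pseudogene", "other"),
   ("translated_unprocessed_pseudogene", "other"),
   ("unitary_pseudogene", "other"),
   ("transcribed_unitary_pseudogene", "other"),
   ("polymorphic pseudogene", "other"),
   ("IG_C_gene", "other"),
   ("IG_D_gene", "other"),
   ("IG_J_gene", "other"),
   ("IG_LV_gene", "other"),
   ("IG_V_gene", "other"),
   ("TR_C_gene", "other"),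
   ("TR_D_gene", "other"),
   ("TR_J_gene", "other"),
   ("TR_V_gene", "other"),
   ("IG_C_pseudogene", "other"),
   ("IG_D_pseudogene", "other"),
   ("IG_J_pseudogene", "other"),
   ("IG_V_pseudogene", "other"),
   ("IG_pseudogene", "other"),
   ("TR_J_pseudogene", "other"),
   ("TR_V_pseudogene", "other"),
   ("NOVEL", "other")] := by decide

-- ===== VERDICT (by name: the statement is the Claim_ definition above) =====
set_option maxRecDepth 100000 in
theorem assign_simplified_geneType_spec : Claim_equal_assign_simplified_geneType := by
  intro Type_ _
  unfold Spec_assign_simplified_geneType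
  by_cases h1 : "none" = Type_
  · subst h1; unfold assign_simplified_geneType_alt; rw [pvSimpleType_mk]; decide
  by_cases h2 : "protein_coding" = Type_
  · subst h2; unfold assign_simplified_geneType_alt; rw [pvSimpleType_mk]; decide
  by_cases h3 : "pc" = Type_
  · subst h3; unfold assign_simplified_geneType_alt; rw [pvSimpleType_mk]; decide
  by_cases h4 : "lncRNA" = Type_
  · subst h4; unfold assign_simplified_geneType_alt; rw [pvSimpleType_mk]; decide
  by_cases h5 : "TEC" = Type_
  · subst h5; unfold assign_simplified_geneType_alt; rw [pvSimpleType_mk]; decide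
  by_cases h6 : "processed_transcript" = Type_
  · subst h6; unfold assign_simplified_geneType_alt; rw [pvSimpleType_mk]; decide
  by_cases h7 : "lincRNA" = Type_
  · subst h7; unfold assign_simplified_geneType_alt; rw [pvSimpleType_mk]; decide
  by_cases h8 : "3prime_overlapping_ncrna" = Type_
  · subst h8; unfold assign_simplified_geneType_alt; rw [pvSimpleType_mk]; decide
  by_cases h9 : "antisense" = Type_
  · subst h9; unfold assign_simplified_geneType_alt; rw [pvSimpleType_mk]; decide
  by_cases h10 : "non_coding" = Type_
  · subst h10; unfold assign_simplified_geneType_alt; rw [pvSimpleType_mk]; decide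
  by_cases h11 : "sense_intronic" = Type_
  · subst h11; unfold assign_simplified_geneType_alt; rw [pvSimpleType_mk]; decide
  by_cases h12 : "sense_overlapping" = Type_
  · subst h12; unfold assign_simplified_geneType_alt; rw [pvSimpleType_mk]; decide
  by_cases h13 : "macro_lncRNA" = Type_
  · subst h13; unfold assign_simplified_geneType_alt; rw [pvSimpleType_mk]; decide
  by_cases h14 : "antisense_RNA" = Type_
  · subst h14; unfold assign_simplified_geneType_alt; rw [pvSimpleType_mk]; decide
  by_cases h15 : "bidirectional_promoter_lncrna" = Type_
  · subst h15; unfold assign_simplified_geneType_alt; rw [pvSimpleType_mk]; decide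
  by_cases h16 : "3prime_overlapping_ncRNA" = Type_
  · subst h16; unfold assign_simplified_geneType_alt; rw [pvSimpleType_mk]; decide
  by_cases h17 : "bidirectional_promoter_lncRNA" = Type_
  · subst h17; unfold assign_simplified_geneType_alt; rw [pvSimpleType_mk]; decide
  by_cases h18 : "ncRNA" = Type_
  · subst h18; unfold assign_simplified_geneType_alt; rw [pvSimpleType_mk]; decide
  by_cases h19 : "snRNA" = Type_
  · subst h19; unfold assign_simplified_geneType_alt; rw [pvSimpleType_mk]; decide
  by_cases h20 : "snoRNA" = Type_
  · subst h20; unfold assign_simplified_geneType_alt; rw [pvSimpleType_mk]; decide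
  by_cases h21 : "rRNA" = Type_
  · subst h21; unfold assign_simplified_geneType_alt; rw [pvSimpleType_mk]; decide
  by_cases h22 : "rRNA_pseudogene" = Type_
  · subst h22; unfold assign_simplified_geneType_alt; rw [pvSimpleType_mk]; decide
  by_cases h23 : "Mt_tRNA" = Type_
  · subst h23; unfold assign_simplified_geneType_alt; rw [pvSimpleType_mk]; decide
  by_cases h24 : "Mt_rRNA" = Type_
  · subst h24; unfold assign_simplified_geneType_alt; rw [pvSimpleType_mk]; decide
  by_cases h25 : "misc_RNA" = Type_
  · subst h25; unfold assign_simplified_geneType_alt; rw [pvSimpleType_mk]; decide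
  by_cases h26 : "miRNA" = Type_
  · subst h26; unfold assign_simplified_geneType_alt; rw [pvSimpleType_mk]; decide
  by_cases h27 : "ribozyme" = Type_
  · subst h27; unfold assign_simplified_geneType_alt; rw [pvSimpleType_mk]; decide
  by_cases h28 : "sRNA" = Type_
  · subst h28; unfold assign_simplified_geneType_alt; rw [pvSimpleType_mk]; decide
  by_cases h29 : "scaRNA" = Type_
  · subst h29; unfold assign_simplified_geneType_alt; rw [pvSimpleType_mk]; decide
  by_cases h30 : "scRNA" = Type_
  · subst h30; unfold assign_simplified_geneType_alt; rw [pvSimpleType_mk]; decide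
  by_cases h31 : "vault_RNA" = Type_
  · subst h31; unfold assign_simplified_geneType_alt; rw [pvSimpleType_mk]; decide
  by_cases h32 : "known_ncrna" = Type_
  · subst h32; unfold assign_simplified_geneType_alt; rw [pvSimpleType_mk]; decide
  by_cases h33 : "vaultRNA" = Type_
  · subst h33; unfold assign_simplified_geneType_alt; rw [pvSimpleType_mk]; decide
  by_cases h34 : "other" = Type_
  · subst h34; unfold assign_simplified_geneType_alt; rw [pvSimpleType_mk]; decide
  by_cases h35 : "processed_pseudogene" = Type_
  · subst h35; unfold assign_simplified_geneType_alt; rw [pvSimpleType_mk]; decide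
  by_cases h36 : "transcribed_processed_pseudogene" = Type_
  · subst h36; unfold assign_simplified_geneType_alt; rw [pvSimpleType_mk]; decide
  by_cases h37 : "translated_processed_pseudogene" = Type_
  · subst h37; unfold assign_simplified_geneType_alt; rw [pvSimpleType_mk]; decide
  by_cases h38 : "unprocessed_pseudogene" = Type_
  · subst h38; unfold assign_simplified_geneType_alt; rw [pvSimpleType_mk]; decide
  by_cases h39 : "transcribed_unprocessed_pseudogene" = Type_
  · subst h39; unfold assign_simplified_geneType_alt; rw [pvSimpleType_mk]; decide
  by_cases h40 : "translated_unprocessed_pseudogene" = Type_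
  · subst h40; unfold assign_simplified_geneType_alt; rw [pvSimpleType_mk]; decide
  by_cases h41 : "unitary_pseudogene" = Type_
  · subst h41; unfold assign_simplified_geneType_alt; rw [pvSimpleType_mk]; decide
  by_cases h42 : "transcribed_unitary_pseudogene" = Type_
  · subst h42; unfold assign_simplified_geneType_alt; rw [pvSimpleType_mk]; decide
  by_cases h43 : "polymorphic pseudogene" = Type_
  · subst h43; unfold assign_simplified_geneType_alt; rw [pvSimpleType_mk]; decide
  by_cases h44 : "IG_C_gene" = Type_
  · subst h44; unfold assign_simplified_geneType_alt; rw [pvSimpleType_mk]; decide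
  by_cases h45 : "IG_D_gene" = Type_
  · subst h45; unfold assign_simplified_geneType_alt; rw [pvSimpleType_mk]; decide
  by_cases h46 : "IG_J_gene" = Type_
  · subst h46; unfold assign_simplified_geneType_alt; rw [pvSimpleType_mk]; decide
  by_cases h47 : "IG_LV_gene" = Type_
  · subst h47; unfold assign_simplified_geneType_alt; rw [pvSimpleType_mk]; decide
  by_cases h48 : "IG_V_gene" = Type_
  · subst h48; unfold assign_simplified_geneType_alt; rw [pvSimpleType_mk]; decide
  by_cases h49 : "TR_C_gene" = Type_
  · subst h49; unfold assign_simplified_geneType_alt; rw [pvSimpleType_mk]; decide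
  by_cases h50 : "TR_D_gene" = Type_
  · subst h50; unfold assign_simplified_geneType_alt; rw [pvSimpleType_mk]; decide
  by_cases h51 : "TR_J_gene" = Type_
  · subst h51; unfold assign_simplified_geneType_alt; rw [pvSimpleType_mk]; decide
  by_cases h52 : "TR_V_gene" = Type_
  · subst h52; unfold assign_simplified_geneType_alt; rw [pvSimpleType_mk]; decide
  by_cases h53 : "IG_C_pseudogene" = Type_
  · subst h53; unfold assign_simplified_geneType_alt; rw [pvSimpleType_mk]; decide
  by_cases h54 : "IG_D_pseudogene" = Type_
  · subst h54; unfold assign_simplified_geneType_alt; rw [pvSimpleType_mk]; decide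
  by_cases h55 : "IG_J_pseudogene" = Type_
  · subst h55; unfold assign_simplified_geneType_alt; rw [pvSimpleType_mk]; decide
  by_cases h56 : "IG_V_pseudogene" = Type_
  · subst h56; unfold assign_simplified_geneType_alt; rw [pvSimpleType_mk]; decide
  by_cases h57 : "IG_pseudogene" = Type_
  · subst h57; unfold assign_simplified_geneType_alt; rw [pvSimpleType_mk]; decide
  by_cases h58 : "TR_J_pseudogene" = Type_
  · subst h58; unfold assign_simplified_geneType_alt; rw [pvSimpleType_mk]; decide
  by_cases h59 : "TR_V_pseudogene" = Type_
  · subst h59; unfold assign_simplified_geneType_alt; rw [pvSimpleType_mk]; decide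
  by_cases h60 : "NOVEL" = Type_
  · subst h60; unfold assign_simplified_geneType_alt; rw [pvSimpleType_mk]; decide
  simp [assign_simplified_geneType, assign_simplified_geneType_alt, pvTypeDict, pvSimpleType_mk,
    PySem.Dict.getD_eq_get?_getD, PySem.Dict.get?, List.foldl, beq_iff_eq,
    h1, Ne.symm h1, h2, Ne.symm h2, h3, Ne.symm h3, h4, Ne.symm h4, h5, Ne.symm h5, h6, Ne.symm h6, h7, Ne.symm h7, h8, Ne.symm h8, h9, Ne.symm h9, h10, Ne.symm h10, h11, Ne.symm h11, h12, Ne.symm h12, h13, Ne.symm h13, h14, Ne.symm h14, h15, Ne.symm h15, h16, Ne.symm h16, h17, Ne.symm h17, h18, Ne.symm h18, h19, Ne.symm h19, h20, Ne.symm h20, h21, Ne.symm h21, h22, Ne.symm h22, h23, Ne.symm h23, h24, Ne.symm h24, h25, Ne.symm h25, h26, Ne.symm h26, h27, Ne.symm h27, h28, Ne.symm h28, h29, Ne.symm h29, h30, Ne.symm h30, h31, Ne.symm h31, h32, Ne.symm h32, h33, Ne.symm h33, h34, Ne.symm h34, h35, Ne.symm h35, h36, Ne.symm h36, h37, Ne.symm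 h37, h38, Ne.symm h38, h39, Ne.symm h39, h40, Ne.symm h40, h41, Ne.symm h41, h42, Ne.symm h42, h43, Ne.symm h43, h44, Ne.symm h44, h45, Ne.symm h45, h46, Ne.symm h46, h47, Ne.symm h47, h48, Ne.symm h48, h49, Ne.symm h49, h50, Ne.symm h50, h51, Ne.symm h51, h52, Ne.symm h52, h53, Ne.symm h53, h54, Ne.symm h54, h55, Ne.symm h55, h56, Ne.symm h56, h57, Ne.symm h57, h58, Ne.symm h58, h59, Ne.symm h59, h60, Ne.symm h60]
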